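-- pv_equiv track=rewrite | github.com/KILNK1204/Modular-Video-Codec-with-Advanced-Features | src/utils/generated_file_process_util.py | differential_encode_motion_vectors
-- ===== SOURCE A (Python) =====
-- def differential_encode_motion_vectors(motion_vectors_per_frame):
--     prev_frame_idx, prev_mv_x, prev_mv_y = 0, 0, 0
--     diff_encoded_mvs = []
--
--     for block in motion_vectors_per_frame:
--         frame_idx = block[0]
--         mv_x = block[1]
--         mv_y = block[2]
--         diff_frame_idx = frame_idx - prev_frame_idx
--         diff_mv_x = mv_x - prev_mv_x
--         diff_mv_y = mv_y - prev_mv_y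
--
--         diff_encoded_mvs.append([diff_frame_idx, diff_mv_x, diff_mv_y])
--
--         prev_frame_idx, prev_mv_x, prev_mv_y = frame_idx, mv_x, mv_y
--
--     return diff_encoded_mvs
-- ===== SOURCE B (Python) =====
-- def differential_encode_motion_vectors(motion_vectors_per_frame):
--     # Column-wise (structure-of-arrays) formulation: split the blocks into the
--     # three coordinate columns, delta-encode each scalar column independently by
--     # absolute indexing, then transpose the columns back into blocks.
--     mvs = list(motion_vectors_per_frame)
--
--     def delta(xs):
--         return [xs[i] - (xs[i - 1] if i else 0) for i in range(len(xs))]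
--
--     cols = [delta([b[i] for b in mvs]) for i in range(3)]
--     return [list(t) for t in zip(*cols)]
-- ===== Notes on version B (the rewrite author's own statement) =====
-- stated objective: alternative
-- what changed: Replaces A's single carry-state loop over blocks with a staged column-wise pipeline: extract the three coordinate columns, delta-encode each scalar column independently by absolute indexing (xs[i] - xs[i-1]), then transpose the columns back into blocks.
-- outside the precondition, e.g. on differential_encode_motion_vectors([[1, 2]]): A raises IndexError, B raises IndexError
import Mathlib
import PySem

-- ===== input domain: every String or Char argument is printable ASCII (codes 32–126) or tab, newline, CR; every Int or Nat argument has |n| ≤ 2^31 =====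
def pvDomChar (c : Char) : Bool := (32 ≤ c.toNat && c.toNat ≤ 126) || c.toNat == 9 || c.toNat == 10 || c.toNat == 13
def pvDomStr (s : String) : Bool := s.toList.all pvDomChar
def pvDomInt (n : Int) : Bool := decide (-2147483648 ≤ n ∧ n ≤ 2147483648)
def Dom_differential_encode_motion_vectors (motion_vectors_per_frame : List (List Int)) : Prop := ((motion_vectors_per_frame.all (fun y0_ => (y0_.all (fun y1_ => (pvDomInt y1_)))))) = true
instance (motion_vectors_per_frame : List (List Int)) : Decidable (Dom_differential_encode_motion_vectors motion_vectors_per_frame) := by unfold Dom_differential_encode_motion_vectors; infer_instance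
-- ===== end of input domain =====

-- B replaces A's carry-state loop over blocks by a column-wise pipeline: split into the
-- three coordinate columns, delta-encode each scalar column by absolute indexing, transpose back.

-- ===== PORT A =====
-- `pyGetD b i 0` is exact for Python's `b[i]` under Pre_ (every block has length ≥ 3).
def pvGet (b : List Int) (i : Int) : Int := PySem.List.pyGetD b i 0

def pvALoop (prev : Int × Int × Int) (l : List (List Int)) : List (List Int) :=
  match l with
  | [] => []
  | block :: rest =>
      [pvGet block 0 - prev.1, pvGet block 1 - prev.2.1, pvGet block 2 - prev.2.2]
        :: pvALoop (pvGet block 0, pvGet block 1, pvGet block 2) rest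

def differential_encode_motion_vectors (motion_vectors_per_frame : List (List Int)) : List (List Int) :=
  pvALoop (0, 0, 0) motion_vectors_per_frame

-- ===== PORT B =====
-- B-side `xs[i]` (indices in range under Pre_)
def pvBGet (b : List Int) (i : Int) : Int := PySem.List.pyGetD b i 0

-- delta(xs) = [xs[i] - (xs[i-1] if i else 0) for i in range(len(xs))]
def pvDelta (xs : List Int) : List Int :=
  (PySem.List.pyRange 0 (xs.length : Int) 1).map
    (fun i => pvBGet xs i - (if i = 0 then 0 else pvBGet xs (i - 1)))

-- cols[i] = delta([b[i] for b in mvs]); the `for i in range(3)` is unrolled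
def pvCol (mvs : List (List Int)) (i : Int) : List Int :=
  pvDelta (mvs.map (fun b => pvBGet b i))

-- zip(*cols) over the three columns, each row rebuilt as a list
def differential_encode_motion_vectors_alt (motion_vectors_per_frame : List (List Int)) : List (List Int) :=
  List.zipWith3 (fun a b c => [a, b, c])
    (pvCol motion_vectors_per_frame 0) (pvCol motion_vectors_per_frame 1) (pvCol motion_vectors_per_frame 2)

-- ===== PRECONDITION & SPEC =====
-- Python A raises IndexError on any block with fewer than 3 entries; exclude exactly those.
def Pre_differential_encode_motion_vectors (motion_vectors_per_frame : List (List Int)) : Prop :=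
  ∀ b ∈ motion_vectors_per_frame, 3 ≤ b.length
instance (motion_vectors_per_frame : List (List Int)) : Decidable (Pre_differential_encode_motion_vectors motion_vectors_per_frame) := by unfold Pre_differential_encode_motion_vectors; infer_instance

def pvWitness_differential_encode_motion_vectors : List (List Int) := [[1, 2, 3], [4, 6, 9]]

def Spec_differential_encode_motion_vectors (motion_vectors_per_frame : List (List Int)) (out : List (List Int)) : Prop := out = differential_encode_motion_vectors_alt motion_vectors_per_frame
instance (motion_vectors_per_frame : List (List Int)) (out : List (List Int)) : Decidable (Spec_differential_encode_motion_vectors motion_vectors_per_frame out) := by unfold Spec_differential_encode_motion_vectors; infer_instance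

-- ===== CLAIM (what is proved, stated in full; the proofs are below) =====
def Claim_equal_differential_encode_motion_vectors : Prop := ∀ (motion_vectors_per_frame : List (List Int)), Dom_differential_encode_motion_vectors motion_vectors_per_frame → Pre_differential_encode_motion_vectors motion_vectors_per_frame → Spec_differential_encode_motion_vectors motion_vectors_per_frame (differential_encode_motion_vectors motion_vectors_per_frame)

-- ===== LEMMAS AND PROOFS =====

-- delta of a column is the pointwise difference with the 0-prepended column
theorem pvDelta_eq_zipWith (xs : List Int) :
    pvDelta xs = List.zipWith (fun a b => a - b) xs (0 :: xs) := by
  apply List.ext_getElem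
  · simp [pvDelta, PySem.List.pyRange_zero_natCast]
  · intro k h1 h2
    have hk : k < xs.length := by
      simpa [pvDelta, PySem.List.pyRange_zero_natCast] using h1
    simp only [pvDelta, PySem.List.pyRange_zero_natCast, List.map_map, List.getElem_map,
      List.getElem_range, List.getElem_zipWith, Function.comp]
    rcases Nat.eq_zero_or_pos k with hk0 | hk0
    · subst hk0
      simp [pvBGet, PySem.List.pyGetD_zero, List.getD_eq_getElem _ _ hk, List.getElem?_eq_getElem hk]
    · have h1k : ((k : Int) - 1) = ((k - 1 : Nat) : Int) := by omega
      simp [pvBGet, Int.natCast_eq_zero, Nat.pos_iff_ne_zero.mp hk0, h1k,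
        List.getElem?_eq_getElem hk,
        List.getElem?_eq_getElem (by omega : k - 1 < xs.length),
        List.getElem_cons]

-- A's loop, for an arbitrary carry, equals the zip of the 0/carry-prepended columns
theorem pvALoop_eq (l : List (List Int)) (p0 p1 p2 : Int) :
    pvALoop (p0, p1, p2) l =
      List.zipWith3 (fun a b c => [a, b, c])
        (List.zipWith (fun a b => a - b) (l.map (fun b => pvGet b 0)) (p0 :: l.map (fun b => pvGet b 0)))
        (List.zipWith (fun a b => a - b) (l.map (fun b => pvGet b 1)) (p1 :: l.map (fun b => pvGet b 1)))
        (List.zipWith (fun a b => a - b) (l.map (fun b => pvGet b 2)) (p2 :: l.map (fun b => pvGet b 2))) := by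
  induction l generalizing p0 p1 p2 with
  | nil => rfl
  | cons b rest ih =>
      simp only [pvALoop, List.map_cons, List.zipWith, List.zipWith3]
      exact congrArg _ (ih _ _ _)

-- ===== VERDICT (by name: the statement is the Claim_ definition above) =====
theorem differential_encode_motion_vectors_spec : Claim_equal_differential_encode_motion_vectors := by
  intro l _ _
  unfold Spec_differential_encode_motion_vectors differential_encode_motion_vectors
    differential_encode_motion_vectors_alt
  simp only [pvCol, pvDelta_eq_zipWith]
  have hBA : pvBGet = pvGet := rfl
  rw [hBA]
  exact pvALoop_eq l 0 0 0
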